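-- pv_equiv track=rewrite | github.com/MrDolphin-gud/SEC-DED-Simulator | hamming.py | yeni_check_hesapla
-- ===== SOURCE A (Python) =====
-- def yeni_check_hesapla(kod, r):
--     yeni_check = 0
--     adimlar = []
--     # Pozisyonlar 1-tabanlı ve LSB'den başlar
--     for i, bit_char in enumerate(kod):
--         pos = i + 1
--         if (pos & (pos - 1)) == 0:  # Skip parity bit positions
--             continue
--         if bit_char == '1':  # Only consider data bits
--             yeni_check ^= pos
--             ikili = format(pos, '0{}b'.format(r))
--             adimlar.append(f"{ikili} (pozisyon {pos})")
--     yeni_check_ikili = format(yeni_check, '0{}b'.format(r))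
--     return yeni_check, yeni_check_ikili, adimlar
-- ===== SOURCE B (Python) =====
-- def yeni_check_hesapla(kod, r):
--     spec = '0{}b'.format(r)
--
--     def go(lo, hi):
--         # divide and conquer over the index range [lo, hi)
--         if hi - lo == 0:
--             return 0, []
--         if hi - lo == 1:
--             p = lo + 1
--             if kod[lo] == '1' and p & (p - 1):
--                 return p, [f"{format(p, spec)} (pozisyon {p})"]
--             return 0, []
--         mid = (lo + hi) // 2
--         c1, a1 = go(lo, mid)
--         c2, a2 = go(mid, hi)
--         return c1 ^ c2, a1 + a2
--
--     yc, adimlar = go(0, len(kod))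
--     return yc, format(yc, spec), adimlar
-- ===== Notes on version B (the rewrite author's own statement) =====
-- stated objective: alternative
-- what changed: A accumulates the XOR check and step strings in one stateful left-to-right loop; B is a divide-and-conquer recursion on the index range that solves the two halves and merges them by XOR and list concatenation.
-- outside the precondition, e.g. on yeni_check_hesapla('101', -1): A raises ValueError, B raises ValueError
import Mathlib
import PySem

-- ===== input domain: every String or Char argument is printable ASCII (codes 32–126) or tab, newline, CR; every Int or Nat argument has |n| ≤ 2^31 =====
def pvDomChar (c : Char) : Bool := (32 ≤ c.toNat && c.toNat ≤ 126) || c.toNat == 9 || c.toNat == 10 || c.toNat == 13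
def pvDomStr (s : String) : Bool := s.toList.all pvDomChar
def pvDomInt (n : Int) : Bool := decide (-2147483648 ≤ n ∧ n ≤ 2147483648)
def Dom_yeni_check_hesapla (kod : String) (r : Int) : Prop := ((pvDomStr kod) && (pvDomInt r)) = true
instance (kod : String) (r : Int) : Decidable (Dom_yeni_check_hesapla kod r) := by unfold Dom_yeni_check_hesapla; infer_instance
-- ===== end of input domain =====

-- B replaces A's single left-to-right accumulation loop by a divide-and-conquer recursion on the
-- index range, merging the two halves' XOR checks and step lists (objective: alternative).


-- format(n, '0{r}b') for n ≥ 0, r ≥ 0: binary digits of n zero-padded on the left to width r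
def pvFmtBin (n : Int) (r : Int) : String :=
  let s := Nat.toDigits 2 n.toNat
  String.mk (List.replicate (r.toNat - s.length) '0' ++ s)

-- the step string "<binary> (pozisyon <pos>)"
def pvStep (pos : Int) (r : Int) : String :=
  String.mk ((pvFmtBin pos r).toList ++ " (pozisyon ".toList ++ (PySem.Int.toStr pos).toList ++ [')'])

-- ===== PORT A =====
-- A's for-loop over enumerate(kod), carried state (yeni_check, adimlar), pos = i+1 as Int
def pvLoopA (r : Int) : List Char → Int → Int → List String → Int × List String
  | [], _, yc, adim => (yc, adim)
  | c :: rest, pos, yc, adim =>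
    if PySem.Int.band pos (pos - 1) == 0 then
      pvLoopA r rest (pos + 1) yc adim
    else if c == '1' then
      pvLoopA r rest (pos + 1) (PySem.Int.bxor yc pos) (adim ++ [pvStep pos r])
    else
      pvLoopA r rest (pos + 1) yc adim

def yeni_check_hesapla (kod : String) (r : Int) : Int × String × List String :=
  let res := pvLoopA r kod.toList 1 0 []
  (res.1, pvFmtBin res.1 r, res.2)

-- ===== PORT B =====
-- B's inner go(lo, hi): divide and conquer over the half-open index range [lo, hi).
-- fuel is only a structural-recursion bound (depth ≤ range size); with fuel ≥ hi - lo,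
-- as at the call site, the fuel-0 branch is never reached.
def pvGoB (cs : List Char) (r : Int) : Nat → Nat → Nat → Int × List String
  | 0, _, _ => (0, [])
  | fuel + 1, lo, hi =>
    if hi - lo = 0 then (0, [])
    else if hi - lo = 1 then
      let p : Int := (lo : Int) + 1
      if cs.getD lo ' ' == '1' && PySem.Int.band p (p - 1) != 0 then (p, [pvStep p r])
      else (0, [])
    else
      let mid := (lo + hi) / 2
      let l := pvGoB cs r fuel lo mid
      let rr := pvGoB cs r fuel mid hi
      (PySem.Int.bxor l.1 rr.1, l.2 ++ rr.2)

def yeni_check_hesapla_alt (kod : String) (r : Int) : Int × String × List String :=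
  let res := pvGoB kod.toList r kod.toList.length 0 kod.toList.length
  (res.1, pvFmtBin res.1 r, res.2)

-- ===== PRECONDITION & SPEC =====
-- Pre_ excludes r < 0, on which Python A raises ValueError (invalid format specifier)
def Pre_yeni_check_hesapla (kod : String) (r : Int) : Prop := 0 ≤ r
instance (kod : String) (r : Int) : Decidable (Pre_yeni_check_hesapla kod r) := by unfold Pre_yeni_check_hesapla; infer_instance
def pvWitness_yeni_check_hesapla : String × Int := ("1011011", 3)

def Spec_yeni_check_hesapla (kod : String) (r : Int) (out : Int × String × List String) : Prop := out = yeni_check_hesapla_alt kod r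
instance (kod : String) (r : Int) (out : Int × String × List String) : Decidable (Spec_yeni_check_hesapla kod r out) := by unfold Spec_yeni_check_hesapla; infer_instance

-- ===== CLAIM (what is proved, stated in full; the proofs are below) =====
def Claim_equal_yeni_check_hesapla : Prop := ∀ (kod : String) (r : Int), Dom_yeni_check_hesapla kod r → Pre_yeni_check_hesapla kod r → Spec_yeni_check_hesapla kod r (yeni_check_hesapla kod r)

-- ===== LEMMAS AND PROOFS =====
-- common characterisation both ports are proved equal to: the active 1-based positions
-- (data bit '1', position not a power of two) of the index range [lo, hi), as Nats
def pvActive (cs : List Char) (i : Nat) : Bool := cs.getD i ' ' == '1' && (i + 1) &&& i != 0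

def pvPos (cs : List Char) (lo hi : Nat) : List Nat :=
  ((List.range' lo (hi - lo)).filter (pvActive cs)).map (· + 1)

theorem foldl_xor_shift (l : List Nat) (a : Nat) :
    l.foldl (· ^^^ ·) a = a ^^^ l.foldl (· ^^^ ·) 0 := by
  induction l generalizing a with
  | nil => simp
  | cons x xs ih =>
    simp only [List.foldl_cons]
    rw [ih (a ^^^ x), ih (0 ^^^ x), Nat.zero_xor, Nat.xor_assoc]

theorem getD_pre (pre : List Char) (c : Char) (rest : List Char) :
    (pre ++ c :: rest).getD pre.length ' ' = c := by
  rw [List.getD_eq_getElem?_getD, List.getElem?_append_right (le_refl _)]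
  simp

theorem pvLoopA_eq (r : Int) (cs pre : List Char) (m : Nat) (adim : List String) :
    pvLoopA r cs ((pre.length : Int) + 1) ((m : Nat) : Int) adim =
      ((((pvPos (pre ++ cs) pre.length (pre.length + cs.length)).foldl (· ^^^ ·) m : Nat) : Int),
       adim ++ (pvPos (pre ++ cs) pre.length (pre.length + cs.length)).map (fun n => pvStep (n : Int) r)) := by
  induction cs generalizing pre m adim with
  | nil => simp [pvLoopA, pvPos]
  | cons c rest ih =>
    have hre : pre ++ c :: rest = (pre ++ [c]) ++ rest := by simp
    have hband : PySem.Int.band ((pre.length : Int) + 1) ((pre.length : Int) + 1 - 1)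
        = (((pre.length + 1) &&& pre.length : Nat) : Int) := by
      rw [show ((pre.length : Int) + 1 - 1) = ((pre.length : Nat) : Int) by ring,
        show ((pre.length : Int) + 1) = (((pre.length + 1 : Nat)) : Int) by push_cast; ring,
        PySem.Int.band_natCast]
    have hrange : List.range' pre.length (pre.length + (c :: rest).length - pre.length)
        = pre.length :: List.range' (pre.length + 1) (pre.length + 1 + rest.length - (pre.length + 1)) := by
      have e1 : pre.length + (c :: rest).length - pre.length = rest.length + 1 := by
        simp only [List.length_cons]; omega
      have e2 : pre.length + 1 + rest.length - (pre.length + 1) = rest.length := by omega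
      rw [e1, e2, List.range'_succ]
    have ihstep : ∀ (m' : Nat) (adim' : List String),
        pvLoopA r rest ((pre.length : Int) + 1 + 1) ((m' : Nat) : Int) adim' =
          ((((pvPos (pre ++ c :: rest) (pre.length + 1) (pre.length + 1 + rest.length)).foldl (· ^^^ ·) m' : Nat) : Int),
           adim' ++ (pvPos (pre ++ c :: rest) (pre.length + 1) (pre.length + 1 + rest.length)).map (fun n => pvStep (n : Int) r)) := by
      intro m' adim'
      have := ih (pre ++ [c]) m' adim'
      simp only [List.length_append, List.length_cons, List.length_nil] at this ⊢
      rw [hre]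
      convert this using 3 <;> push_cast <;> ring
    by_cases hb : (pre.length + 1) &&& pre.length = 0
    · have hA : PySem.Int.band ((pre.length : Int) + 1) ((pre.length : Int) + 1 - 1) = 0 := by
        rw [hband, hb]; simp
      simp only [pvLoopA, hA, beq_self_eq_true, if_true]
      rw [pvPos, hrange]
      rw [List.filter_cons, if_neg (by unfold pvActive; simp [hb])]
      have := ihstep m adim
      rw [pvPos] at this
      simpa using this
    · have hA : (PySem.Int.band ((pre.length : Int) + 1) ((pre.length : Int) + 1 - 1) == 0) = false := by
        rw [hband]; simpa using fun h => hb (by exact_mod_cast h)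
      simp only [pvLoopA, hA, Bool.false_eq_true, if_false]
      rw [pvPos, hrange]
      rw [List.filter_cons]
      by_cases hc : c = '1'
      · rw [if_pos (by simp [hc]), if_pos (by unfold pvActive; rw [getD_pre]; simp [hc, hb])]
        have hbx : PySem.Int.bxor ((m : Nat) : Int) ((pre.length : Int) + 1)
            = ((m ^^^ (pre.length + 1) : Nat) : Int) := by
          rw [show ((pre.length : Int) + 1) = (((pre.length + 1 : Nat)) : Int) by push_cast; ring,
            PySem.Int.bxor_natCast]
        rw [hbx]
        have := ihstep (m ^^^ (pre.length + 1)) (adim ++ [pvStep ((pre.length : Int) + 1) r])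
        rw [pvPos] at this
        rw [this]
        simp only [List.map_cons, List.foldl_cons, Prod.mk.injEq]
        refine ⟨by trivial, ?_⟩
        simp only [List.append_nil, List.append_assoc, List.singleton_append]
        norm_cast
      · rw [if_neg (by simp [hc]), if_neg (by unfold pvActive; rw [getD_pre]; simp [hc])]
        have := ihstep m adim
        rw [pvPos] at this
        simpa using this

theorem pvGoB_eq (cs : List Char) (r : Int) (fuel lo hi : Nat) (hle : hi - lo ≤ fuel) :
    pvGoB cs r fuel lo hi =
      ((((pvPos cs lo hi).foldl (· ^^^ ·) 0 : Nat) : Int),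
       (pvPos cs lo hi).map (fun n => pvStep (n : Int) r)) := by
  induction fuel generalizing lo hi with
  | zero =>
    have h0 : hi - lo = 0 := by omega
    simp [pvGoB, pvPos, h0]
  | succ fuel ih =>
  rw [pvGoB]
  by_cases h0 : hi - lo = 0
  · simp [h0, pvPos]
  · by_cases h1 : hi - lo = 1
    · have hr1 : List.range' lo (hi - lo) = [lo] := by rw [h1]; rfl
      rw [if_neg h0, if_pos h1, pvPos, hr1, List.filter_cons, List.filter_nil]
      by_cases ha : pvActive cs lo = true
      · have ha2 := ha
        unfold pvActive at ha2
        rw [Bool.and_eq_true] at ha2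
        obtain ⟨hget, hband⟩ := ha2
        have hbint : (PySem.Int.band ((lo : Int) + 1) ((lo : Int) + 1 - 1) != 0) = true := by
          rw [show ((lo : Int) + 1 - 1) = ((lo : Nat) : Int) by ring,
            show ((lo : Int) + 1) = (((lo + 1 : Nat)) : Int) by push_cast; ring,
            PySem.Int.band_natCast]
          simp only [bne_iff_ne, ne_eq] at hband ⊢
          exact_mod_cast hband
        rw [if_pos ha]
        simp only [hget, hbint, Bool.and_self, if_pos rfl, List.map_cons, List.map_nil,
          List.foldl_cons, List.foldl_nil, Prod.mk.injEq, Nat.zero_xor]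
        rw [if_pos trivial]
        norm_cast
      · have ha' : pvActive cs lo = false := by simpa using ha
        simp only [ha', Bool.false_eq_true, if_false, List.map_nil, List.foldl_nil, Nat.cast_zero]
        split_ifs with hcond
        · exfalso
          rw [Bool.and_eq_true] at hcond
          obtain ⟨hgd, hbd⟩ := hcond
          unfold pvActive at ha'
          rw [Bool.and_eq_false_iff] at ha'
          rcases ha' with h | h
          · rw [hgd] at h
            simp at h
          · have hz : PySem.Int.band ((lo : Int) + 1) ((lo : Int) + 1 - 1) = 0 := by
              rw [show ((lo : Int) + 1 - 1) = ((lo : Nat) : Int) by ring,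
                show ((lo : Int) + 1) = (((lo + 1 : Nat)) : Int) by push_cast; ring,
                PySem.Int.band_natCast]
              simp only [bne_eq_false_iff_eq] at h
              exact_mod_cast h
            rw [hz] at hbd
            simp at hbd
        · rfl
    · rw [if_neg h0, if_neg h1]
      have hL := ih lo ((lo + hi) / 2) (by omega)
      have hR := ih ((lo + hi) / 2) hi (by omega)
      simp only [hL, hR]
      have hsplit : pvPos cs lo hi = pvPos cs lo ((lo + hi) / 2) ++ pvPos cs ((lo + hi) / 2) hi := by
        obtain ⟨m1, hm1⟩ : ∃ m1, (lo + hi) / 2 = lo + m1 := ⟨(lo + hi) / 2 - lo, by omega⟩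
        rw [pvPos, pvPos, pvPos, ← List.map_append, ← List.filter_append]
        congr 2
        rw [hm1, show lo + m1 - lo = m1 by omega,
          show hi - lo = m1 + (hi - (lo + m1)) by omega, List.range'_append_1]
      rw [hsplit]
      simp only [List.foldl_append, List.map_append, Prod.mk.injEq]
      constructor
      · rw [PySem.Int.bxor_natCast, Nat.cast_inj,
          foldl_xor_shift (pvPos cs ((lo + hi) / 2) hi)
            (List.foldl (· ^^^ ·) 0 (pvPos cs lo ((lo + hi) / 2)))]
      · simp

-- ===== VERDICT (by name: the statement is the Claim_ definition above) =====
theorem yeni_check_hesapla_spec : Claim_equal_yeni_check_hesapla := by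
  intro kod r _ _
  unfold Spec_yeni_check_hesapla yeni_check_hesapla yeni_check_hesapla_alt
  have hA := pvLoopA_eq r kod.toList [] 0 []
  simp only [List.length_nil, List.nil_append, Nat.cast_zero, Nat.zero_add, zero_add] at hA
  simp only [hA, pvGoB_eq kod.toList r kod.toList.length 0 kod.toList.length (by omega)]
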